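-- pv_equiv track=rewrite | github.com/juntalis/ntfslink-python | ntfslink/ctypes_impl/xstruct.py | _expand_format
-- ===== SOURCE A (Python) =====
-- def _expand_format(format):
-- 	result = ''
-- 	chars = list(format)
-- 	while chars:
-- 		ch = chars.pop(0)
-- 		if ch.isdigit():
-- 			while chars and chars[0].isdigit():
-- 				ch += chars.pop(0)
-- 			num = int(ch)
-- 			ch = chars.pop(0)
-- 			if ch is None:
-- 				raise ValueError('Expected a format char to follow {}'.format(num))
-- 			ch = ch * num
-- 		result += ch
-- 	return result
-- ===== SOURCE B (Python) =====
-- def _expand_format(format):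
--     parts = []
--     count = None
--     i = 0
--     n = len(format)
--     while i < n:
--         # scan one maximal run of same digit-ness
--         isdig = format[i].isdigit()
--         j = i
--         while j < n and format[j].isdigit() == isdig:
--             j += 1
--         run = format[i:j]
--         if isdig:
--             count = int(run)
--         elif count is not None:
--             parts.append(run[0] * count + run[1:])
--             count = None
--         else:
--             parts.append(run)
--         i = j
--     if count is not None:
--         raise ValueError('Expected a format char to follow {}'.format(count))
--     return ''.join(parts)
-- ===== Notes on version B (the rewrite author's own statement) =====
-- stated objective: faster
-- what changed: B replaces A's pop(0)-driven char-by-char loop with mutable string concatenation by a single index scan over maximal digit/non-digit runs that keeps a pending count and joins collected parts at the end.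
import Mathlib
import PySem

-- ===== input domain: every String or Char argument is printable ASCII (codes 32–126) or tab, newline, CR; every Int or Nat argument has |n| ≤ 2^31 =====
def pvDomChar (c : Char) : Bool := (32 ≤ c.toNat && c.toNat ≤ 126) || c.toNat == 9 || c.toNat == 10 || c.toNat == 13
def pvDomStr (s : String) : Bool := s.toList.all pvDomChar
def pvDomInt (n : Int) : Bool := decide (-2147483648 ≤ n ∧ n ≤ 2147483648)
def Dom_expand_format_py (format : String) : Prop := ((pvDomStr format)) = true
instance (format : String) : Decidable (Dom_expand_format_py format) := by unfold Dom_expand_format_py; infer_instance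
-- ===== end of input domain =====

-- B replaces A's pop(0)/string-concat loop by a single index-free run scan: it splits
-- the string into maximal runs of digits / non-digits, turning each digit run into a
-- pending count and each non-digit run into one output part (objective: faster, measured).

-- ===== PORT A =====
-- A's while-loop over the mutable char list; `result` is the accumulated string
-- (tracked as List Char, String.mk at the end). The inner `while chars and
-- chars[0].isdigit()` is the takeWhile/dropWhile pair on the remaining chars.
-- When `chars.pop(0)` after a digit run finds the list empty, Python raises
-- IndexError: that branch (excluded by Pre_) returns the result so far.
def aLoop (result : List Char) : List Char → List Char
  | [] => result
  | c :: cs =>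
    if c.isDigit then
      match hdw : cs.dropWhile Char.isDigit with
      | [] => result  -- Python: IndexError (pop from empty list); outside Pre_
      | d :: rest =>
        aLoop (result ++ List.replicate ((PySem.Int.ofStr? (String.mk (c :: cs.takeWhile Char.isDigit))).getD 0).toNat d) rest
    else aLoop (result ++ [c]) cs
  termination_by cs => cs.length
  decreasing_by
  · have := List.length_dropWhile_le (p := Char.isDigit) (l := cs)
    rw [hdw] at this; simp at this ⊢; omega
  · simp

def expand_format_py (format : String) : String := String.mk (aLoop [] format.toList)

-- ===== PORT B =====
-- B's while-loop: each iteration consumes one maximal run of same digit-ness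
-- (the run = takeWhile, the rest = dropWhile of "same digit-ness as the head").
-- A digit run becomes the pending count; a non-digit run becomes one part
-- (first char repeated `count` times if a count is pending). The parts are
-- joined at the end. A pending count at the end is Python's ValueError
-- (outside Pre_); the port returns the parts collected so far there.
def bLoop : List Char → Option Nat → List (List Char) → List (List Char)
  | [], _, parts => parts  -- Python: ValueError if a count is pending; outside Pre_
  | c :: cs, count, parts =>
    let rest := cs.dropWhile (fun x => x.isDigit == c.isDigit)
    if c.isDigit then
      bLoop rest (some ((PySem.Int.ofStr? (String.mk (c :: cs.takeWhile (fun x => x.isDigit == c.isDigit)))).getD 0).toNat) parts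
    else
      match count with
      | some n => bLoop rest none (parts ++ [List.replicate n c ++ cs.takeWhile (fun x => x.isDigit == c.isDigit)])
      | none => bLoop rest none (parts ++ [c :: cs.takeWhile (fun x => x.isDigit == c.isDigit)])
  termination_by cs => cs.length
  decreasing_by
  all_goals
    simp only [List.length_cons]
    have := List.length_dropWhile_le (p := fun x => x.isDigit == c.isDigit) (l := cs)
    omega

def expand_format_py_alt (format : String) : String := String.mk (bLoop format.toList none []).flatten

-- ===== PRECONDITION & SPEC =====
-- Pre_ excludes exactly the strings ending in a digit: there A's `chars.pop(0)` after the
-- final digit run raises IndexError (and B raises ValueError), so neither returns.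
def Pre_expand_format_py (format : String) : Prop :=
  format.toList.getLast?.all (fun c => !c.isDigit) = true
instance (format : String) : Decidable (Pre_expand_format_py format) := by unfold Pre_expand_format_py; infer_instance
def pvWitness_expand_format_py : String := "3x2s."
def Spec_expand_format_py (format : String) (out : String) : Prop := out = expand_format_py_alt format
instance (format : String) (out : String) : Decidable (Spec_expand_format_py format out) := by unfold Spec_expand_format_py; infer_instance

-- ===== CLAIM (what is proved, stated in full; the proofs are below) =====
def Claim_equal_expand_format_py : Prop := ∀ (format : String), Dom_expand_format_py format → Pre_expand_format_py format → Spec_expand_format_py format (expand_format_py format)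

-- ===== LEMMAS AND PROOFS =====

theorem bLoop_nil (count : Option Nat) (parts : List (List Char)) : bLoop [] count parts = parts := by
  rw [bLoop.eq_def]

theorem bLoop_cons (c : Char) (cs : List Char) (count : Option Nat) (parts : List (List Char)) :
    bLoop (c :: cs) count parts =
      (if c.isDigit then
        bLoop (cs.dropWhile (fun x => x.isDigit == c.isDigit)) (some ((PySem.Int.ofStr? (String.mk (c :: cs.takeWhile (fun x => x.isDigit == c.isDigit)))).getD 0).toNat) parts
      else
        match count with
        | some n => bLoop (cs.dropWhile (fun x => x.isDigit == c.isDigit)) none (parts ++ [List.replicate n c ++ cs.takeWhile (fun x => x.isDigit == c.isDigit)])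
        | none => bLoop (cs.dropWhile (fun x => x.isDigit == c.isDigit)) none (parts ++ [c :: cs.takeWhile (fun x => x.isDigit == c.isDigit)])) := by
  rw [bLoop.eq_def]

theorem dropWhile_head_false {α : Type} (p : α → Bool) (l : List α) (x : α) (xs : List α)
    (h : l.dropWhile p = x :: xs) : p x = false := by
  induction l with
  | nil => simp at h
  | cons a l ih =>
    by_cases hp : p a = true
    · rw [List.dropWhile_cons_of_pos hp] at h; exact ih h
    · rw [List.dropWhile_cons_of_neg hp] at h
      cases h; simpa using hp

-- A absorbs a block of non-digit chars one by one into the accumulator.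
theorem aLoop_nondigit_run (run : List Char) (hrun : ∀ x ∈ run, x.isDigit = false) :
    ∀ (rest result : List Char), aLoop result (run ++ rest) = aLoop (result ++ run) rest := by
  induction run with
  | nil => intro rest result; simp
  | cons c run ih =>
    intro rest result
    have hc : c.isDigit = false := hrun c (by simp)
    rw [List.cons_append, aLoop, if_neg (by simp [hc])]
    rw [ih (fun x hx => hrun x (by simp [hx])) rest]
    simp

-- bLoop only appends to `parts`.
theorem bLoop_parts (n : ℕ) : ∀ (cs : List Char), cs.length ≤ n → ∀ (count : Option Nat) (parts : List (List Char)),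
    bLoop cs count parts = parts ++ bLoop cs count [] := by
  induction n with
  | zero =>
    intro cs h count parts
    have : cs = [] := List.eq_nil_of_length_eq_zero (Nat.le_zero.1 h)
    subst this; simp [bLoop_nil]
  | succ n ih =>
    intro cs h count parts
    cases cs with
    | nil => simp [bLoop_nil]
    | cons c cs =>
      have hlen : (cs.dropWhile (fun x => x.isDigit == c.isDigit)).length ≤ n := by
        have := List.length_dropWhile_le (p := fun x => x.isDigit == c.isDigit) (l := cs)
        simp at h; omega
      by_cases hc : c.isDigit = true
      · rw [bLoop_cons, if_pos hc, bLoop_cons, if_pos hc]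
        exact ih _ hlen _ _
      · simp only [Bool.not_eq_true] at hc
        cases count with
        | some k =>
          rw [bLoop_cons, if_neg (by simp [hc]), bLoop_cons, if_neg (by simp [hc])]
          dsimp only
          rw [ih _ hlen none (parts ++ [List.replicate k c ++ cs.takeWhile (fun x => x.isDigit == c.isDigit)])]
          simp only [List.nil_append]
          rw [ih _ hlen none ([List.replicate k c ++ cs.takeWhile (fun x => x.isDigit == c.isDigit)])]
          simp
        | none =>
          rw [bLoop_cons, if_neg (by simp [hc]), bLoop_cons, if_neg (by simp [hc])]
          dsimp only
          rw [ih _ hlen none (parts ++ [c :: cs.takeWhile (fun x => x.isDigit == c.isDigit)])]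
          simp only [List.nil_append]
          rw [ih _ hlen none ([c :: cs.takeWhile (fun x => x.isDigit == c.isDigit)])]
          simp

theorem bLoop_parts_flatten (cs : List Char) (count : Option Nat) (part : List Char) :
    (bLoop cs count [part]).flatten = part ++ (bLoop cs count []).flatten := by
  rw [bLoop_parts cs.length cs le_rfl count [part]]
  simp

-- Main invariant: A's loop result = accumulator ++ join of B's remaining parts.
theorem main_inv (n : ℕ) : ∀ (cs : List Char), cs.length ≤ n → ∀ (result : List Char),
    aLoop result cs = result ++ (bLoop cs none []).flatten := by
  induction n with
  | zero =>
    intro cs h result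
    have : cs = [] := List.eq_nil_of_length_eq_zero (Nat.le_zero.1 h)
    subst this; simp [aLoop, bLoop_nil]
  | succ n ih =>
    intro cs h result
    cases cs with
    | nil => simp [aLoop, bLoop_nil]
    | cons c cs =>
      simp only [List.length_cons] at h
      by_cases hc : c.isDigit = true
      · -- digit run
        have hpred : (fun x : Char => x.isDigit == c.isDigit) = Char.isDigit := by
          funext x; simp [hc]
        rw [aLoop, if_pos hc, bLoop_cons, if_pos hc]
        simp only [hpred]
        cases hdrop : cs.dropWhile Char.isDigit with
        | nil => simp [bLoop_nil]
        | cons d rest =>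
          have hd : d.isDigit = false := dropWhile_head_false _ _ _ _ hdrop
          have hdl : (cs.dropWhile Char.isDigit).length ≤ cs.length :=
            List.length_dropWhile_le _ _
          rw [hdrop] at hdl; simp at hdl
          set num := ((PySem.Int.ofStr? (String.mk (c :: cs.takeWhile Char.isDigit))).getD 0).toNat with hnum
          rw [bLoop_cons, if_neg (by simp [hd])]
          -- B consumes the run d :: takeWhile nondigit rest; A consumes them one by one
          have hpred2 : (fun x : Char => x.isDigit == d.isDigit) = (fun x => !x.isDigit) := by
            funext x; simp [hd]
          rw [hpred2]
          have hsplit : rest = rest.takeWhile (fun x => !x.isDigit) ++ rest.dropWhile (fun x => !x.isDigit) :=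
            (List.takeWhile_append_dropWhile).symm
          have hall : ∀ x ∈ rest.takeWhile (fun x : Char => !x.isDigit), x.isDigit = false := by
            intro x hx
            have := List.mem_takeWhile_imp hx
            simpa using this
          have hrest : (rest.dropWhile (fun x => !x.isDigit)).length ≤ n := by
            have := List.length_dropWhile_le (p := fun x : Char => !x.isDigit) (l := rest)
            omega
          calc aLoop (result ++ List.replicate num d) rest
              = aLoop (result ++ List.replicate num d)
                  (rest.takeWhile (fun x => !x.isDigit) ++ rest.dropWhile (fun x => !x.isDigit)) := by
                rw [← hsplit]
            _ = aLoop ((result ++ List.replicate num d) ++ rest.takeWhile (fun x => !x.isDigit))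
                  (rest.dropWhile (fun x => !x.isDigit)) := aLoop_nondigit_run _ hall _ _
            _ = ((result ++ List.replicate num d) ++ rest.takeWhile (fun x => !x.isDigit)) ++
                  (bLoop (rest.dropWhile (fun x => !x.isDigit)) none []).flatten := ih _ hrest _
            _ = result ++ (bLoop (rest.dropWhile (fun x => !x.isDigit)) none
                  [List.replicate num d ++ rest.takeWhile (fun x => !x.isDigit)]).flatten := by
                rw [bLoop_parts_flatten]
                simp
      · -- non-digit run, no pending count
        simp only [Bool.not_eq_true] at hc
        rw [aLoop, if_neg (by simp [hc]), bLoop_cons, if_neg (by simp [hc])]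
        have hpred : (fun x : Char => x.isDigit == c.isDigit) = (fun x => !x.isDigit) := by
          funext x; simp [hc]
        rw [hpred]
        have hsplit : cs = cs.takeWhile (fun x => !x.isDigit) ++ cs.dropWhile (fun x => !x.isDigit) :=
          (List.takeWhile_append_dropWhile).symm
        have hall : ∀ x ∈ cs.takeWhile (fun x : Char => !x.isDigit), x.isDigit = false := by
          intro x hx
          have := List.mem_takeWhile_imp hx
          simpa using this
        have hrest : (cs.dropWhile (fun x => !x.isDigit)).length ≤ n := by
          have := List.length_dropWhile_le (p := fun x : Char => !x.isDigit) (l := cs)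
          omega
        calc aLoop (result ++ [c]) cs
            = aLoop (result ++ [c])
                (cs.takeWhile (fun x => !x.isDigit) ++ cs.dropWhile (fun x => !x.isDigit)) := by
              rw [← hsplit]
          _ = aLoop ((result ++ [c]) ++ cs.takeWhile (fun x => !x.isDigit))
                (cs.dropWhile (fun x => !x.isDigit)) := aLoop_nondigit_run _ hall _ _
          _ = ((result ++ [c]) ++ cs.takeWhile (fun x => !x.isDigit)) ++
                (bLoop (cs.dropWhile (fun x => !x.isDigit)) none []).flatten := ih _ hrest _
          _ = result ++ (bLoop (cs.dropWhile (fun x => !x.isDigit)) none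
                [c :: cs.takeWhile (fun x => !x.isDigit)]).flatten := by
              rw [bLoop_parts_flatten]
              simp

-- ===== VERDICT (by name: the statement is the Claim_ definition above) =====
theorem expand_format_py_spec : Claim_equal_expand_format_py := by
  intro format _ _
  unfold Spec_expand_format_py expand_format_py expand_format_py_alt
  rw [main_inv format.toList.length _ le_rfl]
  simp
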